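-- pv_equiv track=rewrite | github.com/sibblegp/b2blaze | b2blaze/utilities.py | get_part_ranges
-- ===== SOURCE A (Python) =====
-- def get_part_ranges(content_length, part_size):
--     parts = []
--     next_offest = 0
--     while content_length > 0:
--         if content_length < part_size:
--             part_size = content_length
--         parts.append((next_offest, part_size))
--         next_offest += part_size
--         content_length -= part_size
--     return parts
-- ===== SOURCE B (Python) =====
-- def get_part_ranges(content_length, part_size):
--     if content_length <= 0:
--         return []
--     full, rem = divmod(content_length, part_size)
--     parts = [(i * part_size, part_size) for i in range(full)]
--     if rem:
--         parts.append((full * part_size, rem))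
--     return parts
-- ===== Notes on version B (the rewrite author's own statement) =====
-- stated objective: alternative
-- what changed: Replaces A's stateful decrement loop (which repeatedly subtracts from content_length, mutates part_size on the last chunk and accumulates next_offset) with an arithmetic decomposition: one divmod computes the number of full parts and the remainder, the full parts are emitted from their index (i*part_size, part_size), and the single short tail part is appended iff the remainder is nonzero.
import Mathlib
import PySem

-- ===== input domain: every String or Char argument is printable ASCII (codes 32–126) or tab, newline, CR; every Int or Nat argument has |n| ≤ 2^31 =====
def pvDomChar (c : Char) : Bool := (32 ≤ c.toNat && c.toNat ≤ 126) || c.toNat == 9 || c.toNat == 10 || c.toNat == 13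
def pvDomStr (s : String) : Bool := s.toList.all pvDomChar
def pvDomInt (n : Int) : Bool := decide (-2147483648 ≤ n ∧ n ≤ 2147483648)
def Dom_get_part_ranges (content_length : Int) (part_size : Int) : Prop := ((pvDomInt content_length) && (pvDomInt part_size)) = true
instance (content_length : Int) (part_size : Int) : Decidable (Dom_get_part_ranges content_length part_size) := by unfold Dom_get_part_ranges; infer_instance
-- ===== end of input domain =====

-- B replaces A's stateful decrement loop by an arithmetic decomposition: divmod gives the
-- number of full parts and the remainder, full parts come from their index, the short tail
-- is appended iff the remainder is nonzero; objective: alternative.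

-- ===== PORT A =====
-- A's while loop, as fuel-indexed recursion over the same state (parts accumulated head-first);
-- fuel content_length.toNat suffices whenever part_size > 0 (each iteration removes ≥ 1 from content_length).
def pvGoA : Nat → Int → Int → Int → List (Int × Int)
  | 0, _, _, _ => []
  | n + 1, content_length, part_size, next_offest =>
    if content_length > 0 then
      let part_size' := if content_length < part_size then content_length else part_size
      (next_offest, part_size') :: pvGoA n (content_length - part_size') part_size' (next_offest + part_size')
    else []

def get_part_ranges (content_length : Int) (part_size : Int) : List (Int × Int) :=
  pvGoA content_length.toNat content_length part_size 0

-- ===== PORT B =====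
def get_part_ranges_alt (content_length : Int) (part_size : Int) : List (Int × Int) :=
  if content_length ≤ 0 then []
  else
    let full := PySem.Int.floordiv content_length part_size
    let rem := PySem.Int.mod content_length part_size
    let parts := (PySem.List.pyRange 0 full 1).map (fun i => (i * part_size, part_size))
    if rem ≠ 0 then parts ++ [(full * part_size, rem)] else parts

-- ===== PRECONDITION & SPEC =====
-- Pre_ excludes exactly the inputs on which A never returns: for part_size ≤ 0 and
-- content_length > 0, A's while loop runs forever (the chunk size never shrinks the length).
def Pre_get_part_ranges (content_length : Int) (part_size : Int) : Prop :=
  0 < part_size ∨ content_length ≤ 0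
instance (content_length : Int) (part_size : Int) : Decidable (Pre_get_part_ranges content_length part_size) := by unfold Pre_get_part_ranges; infer_instance

def pvWitness_get_part_ranges : Int × Int := (10, 3)

def Spec_get_part_ranges (content_length : Int) (part_size : Int) (out : List (Int × Int)) : Prop := out = get_part_ranges_alt content_length part_size
instance (content_length : Int) (part_size : Int) (out : List (Int × Int)) : Decidable (Spec_get_part_ranges content_length part_size out) := by unfold Spec_get_part_ranges; infer_instance

-- ===== CLAIM (what is proved, stated in full; the proofs are below) =====
def Claim_equal_get_part_ranges : Prop := ∀ (content_length : Int) (part_size : Int), Dom_get_part_ranges content_length part_size → Pre_get_part_ranges content_length part_size → Spec_get_part_ranges content_length part_size (get_part_ranges content_length part_size)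

-- ===== LEMMAS AND PROOFS =====

theorem pyRange_pos_nil (a b s : Int) (hs : 0 < s) (h : b ≤ a) :
    PySem.List.pyRange a b s = [] := by
  rw [PySem.List.pyRange_of_pos _ _ hs, if_neg (not_lt.2 h)]
  simp

theorem pyRange_pos_cons (a b s : Int) (hs : 0 < s) (hab : a < b) :
    PySem.List.pyRange a b s = a :: PySem.List.pyRange (a + s) b s := by
  rw [PySem.List.pyRange_of_pos _ _ hs, PySem.List.pyRange_of_pos _ _ hs]
  have key : (if a < b then ((b - a + s - 1) / s).toNat else 0)
      = (if a + s < b then ((b - (a + s) + s - 1) / s).toNat else 0) + 1 := by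
    rw [if_pos hab]
    have e1 : b - a + s - 1 = (b - a - 1) + 1 * s := by ring
    have e2 : (b - a + s - 1) / s = (b - a - 1) / s + 1 := by
      rw [e1, Int.add_mul_ediv_right _ _ (ne_of_gt hs)]
    by_cases hc : a + s < b
    · rw [if_pos hc]
      have e3 : b - (a + s) + s - 1 = b - a - 1 := by ring
      have nn : 0 ≤ (b - a - 1) / s := Int.ediv_nonneg (by omega) (le_of_lt hs)
      rw [e3]; omega
    · rw [if_neg hc]
      have e0 : (b - a - 1) / s = 0 := Int.ediv_eq_zero_of_lt (by omega) (by omega)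
      omega
  rw [key, List.range_succ_eq_map]
  simp only [List.map_cons, List.map_map, Nat.cast_zero, mul_zero, add_zero]
  congr 1
  apply List.map_congr_left
  intro k _
  simp only [Function.comp_apply]
  push_cast
  ring

theorem pvGoA_nonpos (n : Nat) (cl ps off : Int) (h : cl ≤ 0) :
    pvGoA n cl ps off = [] := by
  cases n with
  | zero => rfl
  | succ m => simp [pvGoA, not_lt.2 h]

-- A's loop computes the (offset, min size) comprehension over the stepped range.
theorem pvGoA_eq (n : Nat) (cl ps off : Int) (hps : 0 < ps) (hn : cl ≤ (n : Int)) :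
    pvGoA n cl ps off
      = (PySem.List.pyRange off (off + cl) ps).map
          (fun o => (o, min ps (off + cl - o))) := by
  induction n generalizing cl off with
  | zero =>
    rw [pyRange_pos_nil _ _ _ hps (by omega : off + cl ≤ off)]
    rfl
  | succ m ih =>
    by_cases hcl : cl > 0
    · rw [pyRange_pos_cons off (off + cl) ps hps (by omega)]
      simp only [pvGoA, if_pos hcl, List.map_cons]
      by_cases hlt : cl < ps
      · simp only [if_pos hlt]
        rw [show cl - cl = 0 from by ring, pvGoA_nonpos m 0 cl (off + cl) le_rfl,
          pyRange_pos_nil (off + ps) (off + cl) ps hps (by omega)]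
        simp only [List.map_nil]
        have : min ps (off + cl - off) = cl := by omega
        rw [this]
      · simp only [if_neg hlt]
        rw [ih (cl - ps) (off + ps) (by omega)]
        have : off + ps + (cl - ps) = off + cl := by ring
        rw [this]
        have : min ps (off + cl - off) = ps := by omega
        rw [this]
    · rw [pvGoA_nonpos _ _ _ _ (by omega),
        pyRange_pos_nil off (off + cl) ps hps (by omega)]
      rfl

-- B's divmod decomposition equals the same comprehension (for 0 < ps, 0 < cl).
theorem alt_eq_compr (cl ps : Int) (hps : 0 < ps) (hcl : 0 < cl) :
    get_part_ranges_alt cl ps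
      = (PySem.List.pyRange 0 cl ps).map (fun o => (o, min ps (cl - o))) := by
  have hq := PySem.Int.floordiv_mul_add_mod cl ps
  have hr0 : 0 ≤ PySem.Int.mod cl ps := PySem.Int.mod_nonneg cl hps
  have hr1 : PySem.Int.mod cl ps < ps := PySem.Int.mod_lt cl hps
  set q := PySem.Int.floordiv cl ps with hqdef
  set r := PySem.Int.mod cl ps with hrdef
  have hq0 : 0 ≤ q := by nlinarith
  have hN : (cl + ps - 1) / ps = q + (if r = 0 then 0 else 1) := by
    rw [← PySem.Int.floordiv_eq_ediv_of_pos hps,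
      PySem.Int.floordiv_eq_iff_of_pos hps]
    by_cases h : r = 0
    · simp only [h, ite_true]
      constructor <;> nlinarith
    · have hr' : 1 ≤ r := by omega
      simp only [h, ite_false]
      constructor <;> nlinarith
  have hfull : ∀ (k : Nat), (k : Int) < q → min ps (cl - ps * (k : Int)) = ps := by
    intro k hk
    have : ps ≤ cl - ps * (k : Int) := by nlinarith
    omega
  unfold get_part_ranges_alt
  rw [if_neg (by omega : ¬ cl ≤ 0)]
  show (if r ≠ 0
        then ((PySem.List.pyRange 0 q 1).map (fun i => (i * ps, ps))) ++ [(q * ps, r)]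
        else (PySem.List.pyRange 0 q 1).map (fun i => (i * ps, ps)))
      = (PySem.List.pyRange 0 cl ps).map (fun o => (o, min ps (cl - o)))
  rw [PySem.List.pyRange_one, PySem.List.pyRange_of_pos _ _ hps,
    if_pos (by omega : (0:Int) < cl)]
  simp only [sub_zero, zero_add, List.map_map, Function.comp_def]
  by_cases h : r = 0
  · have hNN : ((cl + ps - 1) / ps).toNat = q.toNat := by
      rw [hN, if_pos h]; omega
    rw [if_neg (by simp [h]), hNN]
    apply List.map_congr_left
    intro k hk
    have hk' : (k : Int) < q := by
      rw [List.mem_range] at hk; omega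
    rw [hfull k hk', mul_comm]
  · have hNN : ((cl + ps - 1) / ps).toNat = q.toNat + 1 := by
      rw [hN, if_neg h]; omega
    rw [if_pos h, hNN, List.range_succ, List.map_append]
    congr 1
    · apply List.map_congr_left
      intro k hk
      have hk' : (k : Int) < q := by
        rw [List.mem_range] at hk; omega
      rw [hfull k hk', mul_comm]
    · simp only [List.map_cons, List.map_nil]
      have hcast : ((q.toNat : Int)) = q := by omega
      rw [hcast]
      have h1 : cl - ps * q = r := by rw [mul_comm ps q]; linarith
      rw [h1]
      have hmin : min ps r = r := by omega
      rw [hmin, mul_comm]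

-- ===== VERDICT (by name: the statement is the Claim_ definition above) =====
theorem get_part_ranges_spec : Claim_equal_get_part_ranges := by
  intro cl ps _ hpre
  unfold Spec_get_part_ranges
  by_cases hcl : cl ≤ 0
  · unfold get_part_ranges get_part_ranges_alt
    rw [pvGoA_nonpos _ _ _ _ hcl, if_pos hcl]
  · have hps : 0 < ps := by
      rcases hpre with h | h
      · exact h
      · omega
    unfold get_part_ranges
    rw [pvGoA_eq cl.toNat cl ps 0 hps (Int.self_le_toNat cl),
      alt_eq_compr cl ps hps (by omega)]
    simp
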